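-- pv_equiv track=rewrite | github.com/SPIN-Research-Group/Spira | scripts/models/convert_weights.py | spira_hs_reorder
-- ===== SOURCE A (Python) =====
-- def spira_hs_reorder(kx, ky, kz, threshold):
--     kx_min = -(kx // 2) if (kx % 2 == 1) else -(kx // 2) + 1
--     ky_min = -(ky // 2) if (ky % 2 == 1) else -(ky // 2) + 1
--     kz_min = -(kz // 2) if (kz % 2 == 1) else -(kz // 2) + 1
--
--     kx_max = kx_min + kx - 1
--     ky_max = ky_min + ky - 1
--     kz_max = kz_min + kz - 1
--
--     front = []
--     back = []
--
--     original_idx = 0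
--     for x in range(kx_min, kx_max + 1):
--         for y in range(ky_min, ky_max + 1):
--             for z in range(kz_min, kz_max + 1):
--                 l1 = abs(x) + abs(y) + abs(z)
--
--                 if l1 < threshold:
--                     front.append(original_idx)
--                 else:
--                     back.append(original_idx)
--
--                 original_idx += 1
--
--     return front + back
-- ===== SOURCE B (Python) =====
-- def spira_hs_reorder(kx, ky, kz, threshold):
--     if kx < 1 or ky < 1 or kz < 1:
--         return []
--     kx_min = -(kx // 2) if kx % 2 == 1 else 1 - kx // 2
--     ky_min = -(ky // 2) if ky % 2 == 1 else 1 - ky // 2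
--     kz_min = -(kz // 2) if kz % 2 == 1 else 1 - kz // 2
--
--     def l1(i):
--         q, z = divmod(i, kz)
--         x, y = divmod(q, ky)
--         return abs(kx_min + x) + abs(ky_min + y) + abs(kz_min + z)
--
--     return sorted(range(kx * ky * kz), key=lambda i: l1(i) >= threshold)
-- ===== Notes on version B (the rewrite author's own statement) =====
-- stated objective: alternative
-- what changed: Replaces A's triple nested coordinate loop with a running index and two accumulator lists by a single stable sort of the linear index range keyed on the boolean (l1 >= threshold), with each index's L1 norm reconstructed arithmetically via divmod.
import Mathlib
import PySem

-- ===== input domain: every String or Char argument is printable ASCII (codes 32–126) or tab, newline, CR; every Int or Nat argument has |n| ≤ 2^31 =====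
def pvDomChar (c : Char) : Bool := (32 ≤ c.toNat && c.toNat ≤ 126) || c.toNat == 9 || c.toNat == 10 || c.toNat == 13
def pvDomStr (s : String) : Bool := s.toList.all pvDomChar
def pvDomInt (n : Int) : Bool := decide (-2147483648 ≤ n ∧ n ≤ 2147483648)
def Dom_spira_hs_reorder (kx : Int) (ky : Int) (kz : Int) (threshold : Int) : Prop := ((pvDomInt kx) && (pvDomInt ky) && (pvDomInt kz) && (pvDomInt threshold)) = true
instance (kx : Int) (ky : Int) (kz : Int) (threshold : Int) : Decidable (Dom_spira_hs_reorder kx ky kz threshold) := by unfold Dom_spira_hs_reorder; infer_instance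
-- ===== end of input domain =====

-- B replaces A's triple nested loop with a running counter by a stable sort of the linear
-- index range keyed on the boolean (l1 >= threshold), reconstructing l1 per index via divmod
-- (objective: alternative decomposition, same result).

-- ===== PORT A =====
def spira_hs_reorder (kx : Int) (ky : Int) (kz : Int) (threshold : Int) : List Int :=
  let kx_min := if PySem.Int.mod kx 2 = 1 then -(PySem.Int.floordiv kx 2) else -(PySem.Int.floordiv kx 2) + 1
  let ky_min := if PySem.Int.mod ky 2 = 1 then -(PySem.Int.floordiv ky 2) else -(PySem.Int.floordiv ky 2) + 1
  let kz_min := if PySem.Int.mod kz 2 = 1 then -(PySem.Int.floordiv kz 2) else -(PySem.Int.floordiv kz 2) + 1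
  let kx_max := kx_min + kx - 1
  let ky_max := ky_min + ky - 1
  let kz_max := kz_min + kz - 1
  -- state: (front, back, original_idx)
  let s : List Int × List Int × Int :=
    (PySem.List.pyRange kx_min (kx_max + 1) 1).foldl (fun s x =>
      (PySem.List.pyRange ky_min (ky_max + 1) 1).foldl (fun s y =>
        (PySem.List.pyRange kz_min (kz_max + 1) 1).foldl (fun s z =>
          let l1 := |x| + |y| + |z|
          if l1 < threshold then (s.1 ++ [s.2.2], s.2.1, s.2.2 + 1)
          else (s.1, s.2.1 ++ [s.2.2], s.2.2 + 1)) s) s) ([], [], 0)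
  s.1 ++ s.2.1

-- ===== PORT B =====
-- l1(i): reconstruct the coordinates of linear index i via divmod (kz, ky ≥ 1 where used, so
-- Python's divmod never raises; floordiv/mod are exact)
def pvL1B (kx_min ky_min kz_min ky kz : Int) (i : Int) : Int :=
  let q := PySem.Int.floordiv i kz
  let z := PySem.Int.mod i kz
  let x := PySem.Int.floordiv q ky
  let y := PySem.Int.mod q ky
  |kx_min + x| + |ky_min + y| + |kz_min + z|

def spira_hs_reorder_alt (kx : Int) (ky : Int) (kz : Int) (threshold : Int) : List Int :=
  if kx < 1 ∨ ky < 1 ∨ kz < 1 then []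
  else
    let kx_min := if PySem.Int.mod kx 2 = 1 then -(PySem.Int.floordiv kx 2) else 1 - PySem.Int.floordiv kx 2
    let ky_min := if PySem.Int.mod ky 2 = 1 then -(PySem.Int.floordiv ky 2) else 1 - PySem.Int.floordiv ky 2
    let kz_min := if PySem.Int.mod kz 2 = 1 then -(PySem.Int.floordiv kz 2) else 1 - PySem.Int.floordiv kz 2
    PySem.List.sorted (PySem.List.pyRange 0 (kx * ky * kz) 1)
      (fun i => decide (threshold ≤ pvL1B kx_min ky_min kz_min ky kz i)) false

-- ===== PRECONDITION & SPEC =====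
def Spec_spira_hs_reorder (kx : Int) (ky : Int) (kz : Int) (threshold : Int) (out : List Int) : Prop := out = spira_hs_reorder_alt kx ky kz threshold
instance (kx : Int) (ky : Int) (kz : Int) (threshold : Int) (out : List Int) : Decidable (Spec_spira_hs_reorder kx ky kz threshold out) := by unfold Spec_spira_hs_reorder; infer_instance

-- ===== CLAIM (what is proved, stated in full; the proofs are below) =====
def Claim_equal_spira_hs_reorder : Prop := ∀ (kx : Int) (ky : Int) (kz : Int) (threshold : Int), Dom_spira_hs_reorder kx ky kz threshold → Spec_spira_hs_reorder kx ky kz threshold (spira_hs_reorder kx ky kz threshold)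

-- ===== LEMMAS AND PROOFS =====

-- ---- A-side characterisation: partition fold ----
def pvStep (t : Int) (s : List Int × List Int × Int) (v : Int) : List Int × List Int × Int :=
  if v < t then (s.1 ++ [s.2.2], s.2.1, s.2.2 + 1) else (s.1, s.2.1 ++ [s.2.2], s.2.2 + 1)

def pvFront (t : Int) : List Int → Int → List Int
  | [], _ => []
  | v :: L, i => if v < t then i :: pvFront t L (i + 1) else pvFront t L (i + 1)

def pvBack (t : Int) : List Int → Int → List Int
  | [], _ => []
  | v :: L, i => if v < t then pvBack t L (i + 1) else i :: pvBack t L (i + 1)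

theorem foldl_pvStep (t : Int) : ∀ (L : List Int) (s : List Int × List Int × Int),
    L.foldl (pvStep t) s = (s.1 ++ pvFront t L s.2.2, s.2.1 ++ pvBack t L s.2.2, s.2.2 + L.length) := by
  intro L
  induction L with
  | nil => intro s; simp [pvFront, pvBack]
  | cons v L ih =>
    intro s
    simp only [List.foldl_cons, ih, pvStep, pvFront, pvBack]
    by_cases h : v < t <;> simp [h, List.append_assoc] <;> omega

-- canonical grid of l1-values
def pvGrid (xm ym zm : Int) (a b c : Nat) : List Int :=
  (List.range a).flatMap (fun i : Nat => (List.range b).flatMap (fun j : Nat =>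
    (List.range c).map (fun k : Nat => |xm + (i : Int)| + |ym + (j : Int)| + |zm + (k : Int)|)))

theorem triple_fold (t xm ym zm : Int) (a b c : Nat) (s : List Int × List Int × Int) :
    ((List.range a).map (fun i : Nat => xm + (i : Int))).foldl (fun s x =>
      ((List.range b).map (fun j : Nat => ym + (j : Int))).foldl (fun s y =>
        ((List.range c).map (fun k : Nat => zm + (k : Int))).foldl (fun s z =>
          let l1 := |x| + |y| + |z|
          if l1 < t then (s.1 ++ [s.2.2], s.2.1, s.2.2 + 1)
          else (s.1, s.2.1 ++ [s.2.2], s.2.2 + 1)) s) s) s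
    = (pvGrid xm ym zm a b c).foldl (pvStep t) s := by
  simp only [pvGrid, List.foldl_flatMap, List.foldl_map, pvStep]

theorem A_char (kx ky kz t : Int) :
    spira_hs_reorder kx ky kz t =
      pvFront t (pvGrid
          (if PySem.Int.mod kx 2 = 1 then -(PySem.Int.floordiv kx 2) else -(PySem.Int.floordiv kx 2) + 1)
          (if PySem.Int.mod ky 2 = 1 then -(PySem.Int.floordiv ky 2) else -(PySem.Int.floordiv ky 2) + 1)
          (if PySem.Int.mod kz 2 = 1 then -(PySem.Int.floordiv kz 2) else -(PySem.Int.floordiv kz 2) + 1)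
          kx.toNat ky.toNat kz.toNat) 0 ++
        pvBack t (pvGrid
          (if PySem.Int.mod kx 2 = 1 then -(PySem.Int.floordiv kx 2) else -(PySem.Int.floordiv kx 2) + 1)
          (if PySem.Int.mod ky 2 = 1 then -(PySem.Int.floordiv ky 2) else -(PySem.Int.floordiv ky 2) + 1)
          (if PySem.Int.mod kz 2 = 1 then -(PySem.Int.floordiv kz 2) else -(PySem.Int.floordiv kz 2) + 1)
          kx.toNat ky.toNat kz.toNat) 0 := by
  simp only [spira_hs_reorder]
  generalize (if PySem.Int.mod kx 2 = 1 then -(PySem.Int.floordiv kx 2) else -(PySem.Int.floordiv kx 2) + 1) = xm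
  generalize (if PySem.Int.mod ky 2 = 1 then -(PySem.Int.floordiv ky 2) else -(PySem.Int.floordiv ky 2) + 1) = ym
  generalize (if PySem.Int.mod kz 2 = 1 then -(PySem.Int.floordiv kz 2) else -(PySem.Int.floordiv kz 2) + 1) = zm
  have e1 : xm + kx - 1 + 1 = xm + kx := by ring
  have e2 : ym + ky - 1 + 1 = ym + ky := by ring
  have e3 : zm + kz - 1 + 1 = zm + kz := by ring
  rw [e1, e2, e3, PySem.List.pyRange_one xm (xm + kx), PySem.List.pyRange_one ym (ym + ky),
    PySem.List.pyRange_one zm (zm + kz)]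
  have f1 : xm + kx - xm = kx := by ring
  have f2 : ym + ky - ym = ky := by ring
  have f3 : zm + kz - zm = kz := by ring
  rw [f1, f2, f3, triple_fold, foldl_pvStep]
  simp

-- ---- stable sort on a boolean key = partition ----
theorem insertBy_key_false {α : Type} (key : α → Bool) (x : α) (hx : key x = false) :
    ∀ (F T : List α), (∀ a ∈ F, key a = false) → (∀ b ∈ T, key b = true) →
      PySem.List.insertBy (fun a b => decide (key a < key b)) x (F ++ T) = (F ++ [x]) ++ T := by
  intro F
  induction F with
  | nil =>
    intro T _ hT
    cases T with
    | nil => rfl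
    | cons b t =>
      have hb := hT b (by simp)
      show (if decide (key x < key b) = true then _ else _) = _
      simp [hx, hb]
  | cons a F ih =>
    intro T hF hT
    have ha := hF a (by simp)
    show (if decide (key x < key a) = true then _ else _) = _
    simp only [hx, ha, show decide ((false : Bool) < false) = false by decide, Bool.false_eq_true,
      if_false, List.cons_append]
    show a :: PySem.List.insertBy _ x (F ++ T) = _
    rw [ih T (fun y hy => hF y (by simp [hy])) hT]

theorem insertBy_key_true {α : Type} (key : α → Bool) (x : α) (hx : key x = true) :
    ∀ (ys : List α), PySem.List.insertBy (fun a b => decide (key a < key b)) x ys = ys ++ [x] := by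
  intro ys
  induction ys with
  | nil => rfl
  | cons b t ih =>
    have hb : decide (key x < key b) = false := by cases h : key b <;> simp [hx]
    show (if decide (key x < key b) = true then _ else _) = _
    simp [hb, ih]

theorem foldl_insertBy_bool {α : Type} (key : α → Bool) :
    ∀ (xs F T : List α), (∀ a ∈ F, key a = false) → (∀ b ∈ T, key b = true) →
      xs.foldl (fun acc x => PySem.List.insertBy (fun a b => decide (key a < key b)) x acc) (F ++ T) =
        (F ++ xs.filter (fun x => !key x)) ++ (T ++ xs.filter (fun x => key x)) := by
  intro xs
  induction xs with
  | nil => intro F T _ _; simp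
  | cons x xs ih =>
    intro F T hF hT
    simp only [List.foldl_cons]
    cases hx : key x with
    | false =>
      rw [insertBy_key_false key x hx F T hF hT,
        ih (F ++ [x]) T (by
          intro a ha
          rcases List.mem_append.1 ha with h | h
          · exact hF a h
          · simp at h; simpa [h] using hx) hT]
      simp [hx, List.append_assoc]
    | true =>
      rw [insertBy_key_true key x hx (F ++ T), List.append_assoc,
        ih F (T ++ [x]) hF (by
          intro b hb
          rcases List.mem_append.1 hb with h | h
          · exact hT b h
          · simp at h; simpa [h] using hx)]
      simp [hx, List.append_assoc]

theorem sorted_bool {α : Type} (xs : List α) (key : α → Bool) :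
    PySem.List.sorted xs key false = xs.filter (fun x => !key x) ++ xs.filter (fun x => key x) := by
  rw [PySem.List.sorted_eq_foldl_insertBy]
  simpa using foldl_insertBy_bool key xs [] [] (by simp) (by simp)

-- ---- linear index arithmetic ----
theorem range_mul_flatMap {β : Type} (f : Nat → β) (a b : Nat) :
    (List.range (a * b)).map f =
      (List.range a).flatMap (fun i => (List.range b).map (fun j => f (i * b + j))) := by
  induction a with
  | zero => simp
  | succ a ih =>
    rw [List.range_succ, List.flatMap_append, ← ih, Nat.succ_mul, List.range_add,
      List.map_append, List.map_map]
    simp [Function.comp, Nat.add_comm]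

theorem int_div_mod_of (q r b : Int) (hb : 0 < b) (h0 : 0 ≤ r) (hr : r < b) :
    PySem.Int.floordiv (q * b + r) b = q ∧ PySem.Int.mod (q * b + r) b = r := by
  rw [PySem.Int.floordiv_eq_ediv_of_pos hb, PySem.Int.mod_eq_emod_of_pos hb]
  constructor
  · rw [Int.add_comm, Int.add_mul_ediv_right r q (by omega), Int.ediv_eq_zero_of_lt h0 hr]
    omega
  · rw [Int.add_comm, show (r + q * b) % b = r % b by simp]
    exact Int.emod_eq_of_lt h0 hr

-- the grid equals the l1-table over linear indices
theorem grid_eq_map (xm ym zm : Int) (a b c : Nat) (hb : 0 < b) (hc : 0 < c) :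
    (List.range (a * (b * c))).map (fun n : Nat => pvL1B xm ym zm (b : Int) (c : Int) ((n : Int))) =
      pvGrid xm ym zm a b c := by
  rw [range_mul_flatMap]
  unfold pvGrid
  simp only [List.flatMap_def]
  congr 1
  apply List.map_congr_left
  intro i _
  rw [range_mul_flatMap (fun m => pvL1B xm ym zm (b : Int) (c : Int) ((i * (b * c) + m : Nat) : Int)) b c]
  simp only [List.flatMap_def]
  congr 1
  apply List.map_congr_left
  intro j hj
  apply List.map_congr_left
  intro k hk
  rw [List.mem_range] at hj hk
  have hcast : ((i * (b * c) + (j * c + k) : Nat) : Int) = ((i : Int) * (b : Int) + (j : Int)) * (c : Int) + (k : Int) := by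
    push_cast; ring
  obtain ⟨hd, hm⟩ := int_div_mod_of ((i : Int) * (b : Int) + (j : Int)) (k : Int) (c : Int)
    (by exact_mod_cast hc) (by positivity) (by exact_mod_cast hk)
  obtain ⟨hd2, hm2⟩ := int_div_mod_of (i : Int) (j : Int) (b : Int)
    (by exact_mod_cast hb) (by positivity) (by exact_mod_cast hj)
  simp only [pvL1B, hcast, hd, hm, hd2, hm2]

-- front/back of an l1-table are index filters
theorem pvFront_range (t : Int) (g : Int → Int) : ∀ (n : Nat) (i0 : Int),
    pvFront t ((List.range n).map (fun k : Nat => g (i0 + (k : Int)))) i0 =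
      ((List.range n).map (fun k : Nat => i0 + (k : Int))).filter (fun i => decide (g i < t)) := by
  intro n
  induction n with
  | zero => intro i0; simp [pvFront]
  | succ n ih =>
    intro i0
    rw [List.range_succ_eq_map]
    simp only [List.map_cons, List.map_map, Nat.cast_zero]
    have h1 : ((fun k : Nat => g (i0 + (k : Int))) ∘ Nat.succ) = fun k : Nat => g ((i0 + 1) + (k : Int)) := by
      funext k; simp only [Function.comp]; congr 1; push_cast; ring
    have h2 : ((fun k : Nat => i0 + (k : Int)) ∘ Nat.succ) = fun k : Nat => (i0 + 1) + (k : Int) := by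
      funext k; simp only [Function.comp]; push_cast; ring
    rw [h1, h2, add_zero]
    show pvFront t (g i0 :: _) i0 = _
    simp only [pvFront, ih (i0 + 1), List.filter_cons]
    by_cases h : g i0 < t <;> simp [h]

theorem pvBack_range (t : Int) (g : Int → Int) : ∀ (n : Nat) (i0 : Int),
    pvBack t ((List.range n).map (fun k : Nat => g (i0 + (k : Int)))) i0 =
      ((List.range n).map (fun k : Nat => i0 + (k : Int))).filter (fun i => decide (t ≤ g i)) := by
  intro n
  induction n with
  | zero => intro i0; simp [pvBack]
  | succ n ih =>
    intro i0
    rw [List.range_succ_eq_map]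
    simp only [List.map_cons, List.map_map, Nat.cast_zero]
    have h1 : ((fun k : Nat => g (i0 + (k : Int))) ∘ Nat.succ) = fun k : Nat => g ((i0 + 1) + (k : Int)) := by
      funext k; simp only [Function.comp]; congr 1; push_cast; ring
    have h2 : ((fun k : Nat => i0 + (k : Int)) ∘ Nat.succ) = fun k : Nat => (i0 + 1) + (k : Int) := by
      funext k; simp only [Function.comp]; push_cast; ring
    rw [h1, h2, add_zero]
    show pvBack t (g i0 :: _) i0 = _
    simp only [pvBack, ih (i0 + 1), List.filter_cons]
    by_cases h : g i0 < t <;> simp [h, not_le.2, not_lt.1]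

-- ===== VERDICT (by name: the statement is the Claim_ definition above) =====
theorem spira_hs_reorder_spec : Claim_equal_spira_hs_reorder := by
  intro kx ky kz t _
  unfold Spec_spira_hs_reorder
  rw [A_char]
  have em1 : (1 : Int) - PySem.Int.floordiv kx 2 = -(PySem.Int.floordiv kx 2) + 1 := by ring
  have em2 : (1 : Int) - PySem.Int.floordiv ky 2 = -(PySem.Int.floordiv ky 2) + 1 := by ring
  have em3 : (1 : Int) - PySem.Int.floordiv kz 2 = -(PySem.Int.floordiv kz 2) + 1 := by ring
  unfold spira_hs_reorder_alt
  rw [em1, em2, em3]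
  generalize (if PySem.Int.mod kx 2 = 1 then -(PySem.Int.floordiv kx 2) else -(PySem.Int.floordiv kx 2) + 1) = xm
  generalize (if PySem.Int.mod ky 2 = 1 then -(PySem.Int.floordiv ky 2) else -(PySem.Int.floordiv ky 2) + 1) = ym
  generalize (if PySem.Int.mod kz 2 = 1 then -(PySem.Int.floordiv kz 2) else -(PySem.Int.floordiv kz 2) + 1) = zm
  by_cases h1 : kx < 1 ∨ ky < 1 ∨ kz < 1
  · rw [if_pos h1]
    have h0 : pvGrid xm ym zm kx.toNat ky.toNat kz.toNat = [] := by
      rcases h1 with h | h | h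
      · have : kx.toNat = 0 := by omega
        simp [pvGrid, this]
      · have : ky.toNat = 0 := by omega
        simp [pvGrid, this, List.flatMap_eq_nil_iff]
      · have : kz.toNat = 0 := by omega
        simp [pvGrid, this, List.flatMap_eq_nil_iff]
    simp [h0, pvFront, pvBack]
  · rw [if_neg h1]
    push Not at h1
    obtain ⟨hkx, hky, hkz⟩ := h1
    obtain ⟨a, ha⟩ : ∃ a : Nat, (a : Int) = kx := ⟨kx.toNat, Int.toNat_of_nonneg (by omega)⟩
    obtain ⟨b, hb⟩ : ∃ b : Nat, (b : Int) = ky := ⟨ky.toNat, Int.toNat_of_nonneg (by omega)⟩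
    obtain ⟨c, hc⟩ : ∃ c : Nat, (c : Int) = kz := ⟨kz.toNat, Int.toNat_of_nonneg (by omega)⟩
    subst ha hb hc
    have hb0 : 0 < b := by omega
    have hc0 : 0 < c := by omega
    rw [Int.toNat_natCast, Int.toNat_natCast, Int.toNat_natCast]
    rw [← grid_eq_map xm ym zm a b c hb0 hc0]
    have hg : (fun n : Nat => pvL1B xm ym zm (b : Int) (c : Int) ((n : Int))) =
        (fun k : Nat => (fun x => pvL1B xm ym zm (b : Int) (c : Int) x) ((0 : Int) + (k : Int))) := by
      funext k; rw [zero_add]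
    rw [hg, pvFront_range t _ (a * (b * c)) 0, pvBack_range t _ (a * (b * c)) 0]
    have hn : ((a : Int) * (b : Int) * (c : Int) - 0).toNat = a * (b * c) := by
      rw [sub_zero, ← Nat.cast_mul, ← Nat.cast_mul, Int.toNat_natCast, Nat.mul_assoc]
    rw [PySem.List.pyRange_one 0 ((a : Int) * (b : Int) * (c : Int)), hn, sorted_bool]
    have hkey : (fun x : Int => !decide (t ≤ pvL1B xm ym zm (b : Int) (c : Int) x)) =
        (fun i : Int => decide (pvL1B xm ym zm (b : Int) (c : Int) i < t)) := by
      funext x; rw [← decide_not]; simp [not_le]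
    rw [hkey]
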